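-- pv_equiv track=rewrite | github.com/ArmandXiao/learn-japanese | main-linux.py | processAns
-- ===== SOURCE A (Python) =====
-- def processAns(ans, jpa):
--     index = 0
--     ans = ans.strip()
--     ans = list(ans)
--     while index < len(jpa) and index < len(ans):
--         if jpa[index] == " ":
--             # list has no return value
--             ans.insert(index, " ")
--         index += 1
--
--     return "".join(ans)
-- ===== SOURCE B (Python) =====
-- def processAns(ans, jpa):
--     s = ans.strip()
--     out = []
--     j = 0
--     for ch in jpa:
--         if j >= len(s):
--             break
--         if ch == " ":
--             out.append(" ")
--         else:
--             out.append(s[j])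
--             j += 1
--     return "".join(out) + s[j:]
-- ===== Notes on version B (the rewrite author's own statement) =====
-- stated objective: faster
-- what changed: Replaces A's while-loop that repeatedly calls list.insert (each insert shifting the whole tail) with a single left-to-right merge that appends to an output list and tracks an index into the stripped string, then concatenates the unconsumed remainder.
import Mathlib
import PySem

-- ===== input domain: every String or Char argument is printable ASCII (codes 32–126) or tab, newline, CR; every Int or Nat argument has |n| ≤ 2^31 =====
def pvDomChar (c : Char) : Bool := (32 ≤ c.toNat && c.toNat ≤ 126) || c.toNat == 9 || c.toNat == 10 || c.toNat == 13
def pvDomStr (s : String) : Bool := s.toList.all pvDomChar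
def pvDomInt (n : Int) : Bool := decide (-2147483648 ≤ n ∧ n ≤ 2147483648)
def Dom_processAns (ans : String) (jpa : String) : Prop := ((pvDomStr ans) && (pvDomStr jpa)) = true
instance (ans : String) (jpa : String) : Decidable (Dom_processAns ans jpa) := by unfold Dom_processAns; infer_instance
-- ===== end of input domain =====

-- B is a single left-to-right merge (O(n+m)) instead of A's repeated list.insert (O(n·m)); return values proved equal everywhere.

-- ===== PORT A =====
-- while index < len(jpa) and index < len(ans): if jpa[index] == " ": ans.insert(index, " "); index += 1
def processAnsLoop (jl : List Char) (ansL : List Char) (index : Nat) : List Char :=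
  if h : index < jl.length ∧ index < ansL.length then
    if jl[index]'h.1 == ' ' then
      processAnsLoop jl (PySem.List.insert ansL (index : Int) ' ') (index + 1)
    else
      processAnsLoop jl ansL (index + 1)
  else ansL
termination_by jl.length - index

def processAns (ans : String) (jpa : String) : String :=
  String.mk (processAnsLoop jpa.toList (PySem.Str.strip ans).toList 0)

-- ===== PORT B =====
-- for ch in jpa: break when s exhausted; a space in jpa emits a space, anything else emits the next char of s
def processAnsAltLoop (s : List Char) (j : Nat) (jl : List Char) (out : List Char) : List Char :=
  match jl with
  | [] => out ++ s.drop j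
  | ch :: rest =>
      if s.length ≤ j then out ++ s.drop j
      else if ch == ' ' then processAnsAltLoop s j rest (out ++ [' '])
      else processAnsAltLoop s (j + 1) rest (out ++ [s[j]!])

def processAns_alt (ans : String) (jpa : String) : String :=
  String.mk (processAnsAltLoop (PySem.Str.strip ans).toList 0 jpa.toList [])

-- ===== PRECONDITION & SPEC =====
def Spec_processAns (ans : String) (jpa : String) (out : String) : Prop := out = processAns_alt ans jpa
instance (ans : String) (jpa : String) (out : String) : Decidable (Spec_processAns ans jpa out) := by unfold Spec_processAns; infer_instance

-- ===== CLAIM (what is proved, stated in full; the proofs are below) =====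
def Claim_equal_processAns : Prop := ∀ (ans : String) (jpa : String), Dom_processAns ans jpa → Spec_processAns ans jpa (processAns ans jpa)

-- ===== LEMMAS AND PROOFS =====

-- key invariant: A's list at step i is out ++ s.drop j with out.length = i and jl.drop i = rest
theorem processAns_key (s : List Char) (jl : List Char) :
    ∀ (rest : List Char) (i j : Nat) (out : List Char),
      jl.drop i = rest → out.length = i → j ≤ s.length →
      processAnsLoop jl (out ++ s.drop j) i = processAnsAltLoop s j rest out := by
  intro rest
  induction rest with
  | nil =>
      intro i j out hdrop hlen hj
      have hile : jl.length ≤ i := by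
        by_contra hlt
        push_neg at hlt
        have := List.drop_eq_getElem_cons hlt
        rw [hdrop] at this
        exact (List.cons_ne_nil _ _) this.symm
      rw [processAnsLoop, processAnsAltLoop]
      simp [Nat.not_lt_of_le hile]
  | cons ch rest ih =>
      intro i j out hdrop hlen hj
      have hi : i < jl.length := by
        by_contra hle
        push_neg at hle
        rw [List.drop_eq_nil_of_le hle] at hdrop
        exact (List.cons_ne_nil _ _) hdrop.symm
      have hch : jl[i] = ch := by
        have := List.drop_eq_getElem_cons hi
        rw [hdrop] at this
        exact (List.cons.injEq _ _ _ _ ▸ this).1.symm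
      rw [processAnsLoop, processAnsAltLoop]
      by_cases hjs : s.length ≤ j
      · -- s exhausted: loop condition fails (list length = i), both return out
        have hsd : s.drop j = [] := List.drop_eq_nil_of_le hjs
        simp [hsd, hlen, hjs]
      · push_neg at hjs
        have hcond : i < jl.length ∧ i < (out ++ s.drop j).length := by
          constructor
          · exact hi
          · simp [hlen]; omega
        rw [dif_pos hcond]
        rw [if_neg (Nat.not_le_of_lt hjs)]
        by_cases hsp : ch = ' '
        · -- insert a space at position i = out.length
          have hins : PySem.List.insert (out ++ s.drop j) (i : Int) ' '
              = (out ++ [' ']) ++ s.drop j := by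
            have hle : i ≤ (out ++ s.drop j).length := by simp [hlen]
            rw [PySem.List.insert_natCast _ _ _ hle]
            simp [hlen]
          rw [if_pos (by simp [hch, hsp]), hins]
          rw [ih (i + 1) j (out ++ [' ']) (by rw [← List.tail_drop, hdrop]; rfl)
              (by simp [hlen]) (le_of_lt hjs)]
          simp [hsp]
        · -- consume the next char of s
          have hsd : s.drop j = s[j] :: s.drop (j + 1) := (List.getElem_cons_drop hjs).symm
          rw [if_neg (by simp [hch, hsp])]
          have : out ++ s.drop j = (out ++ [s[j]!]) ++ s.drop (j + 1) := by
            rw [hsd]; simp [hjs]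
          rw [this]
          rw [ih (i + 1) (j + 1) (out ++ [s[j]!]) (by rw [← List.tail_drop, hdrop]; rfl)
              (by simp [hlen]) hjs]
          simp [hsp]

-- ===== VERDICT (by name: the statement is the Claim_ definition above) =====
theorem processAns_spec : Claim_equal_processAns := by
  intro ans jpa _
  unfold Spec_processAns processAns processAns_alt
  have h := processAns_key (PySem.Str.strip ans).toList jpa.toList jpa.toList 0 0 [] rfl rfl
      (Nat.zero_le _)
  simp only [List.nil_append, List.drop_zero] at h
  rw [h]
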